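-- pv_equiv track=rewrite | github.com/Tiencut/python3 | oj/PT020_SoChinNut.py | TongCacChuSo
-- ===== SOURCE A (Python) =====
-- def TongCacChuSo(n):
--     tmp = 0
--     while (n>0):
--         tmp += n%10
--         n //= 10
--     if tmp%10 == 9:
--         return 1
--     else:
--         return 0
-- ===== SOURCE B (Python) =====
-- def TongCacChuSo(n):
--     if n <= 0:
--         return 0
--     s = sum(int(c) for c in str(n))
--     return 1 if s % 10 == 9 else 0
-- ===== Notes on version B (the rewrite author's own statement) =====
-- stated objective: idiomatic
-- what changed: Digit sum computed by iterating over the characters of str(n) instead of a modulo/floor-division while-loop, with an explicit guard for non-positive arguments replacing the never-entered loop.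
import Mathlib
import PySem

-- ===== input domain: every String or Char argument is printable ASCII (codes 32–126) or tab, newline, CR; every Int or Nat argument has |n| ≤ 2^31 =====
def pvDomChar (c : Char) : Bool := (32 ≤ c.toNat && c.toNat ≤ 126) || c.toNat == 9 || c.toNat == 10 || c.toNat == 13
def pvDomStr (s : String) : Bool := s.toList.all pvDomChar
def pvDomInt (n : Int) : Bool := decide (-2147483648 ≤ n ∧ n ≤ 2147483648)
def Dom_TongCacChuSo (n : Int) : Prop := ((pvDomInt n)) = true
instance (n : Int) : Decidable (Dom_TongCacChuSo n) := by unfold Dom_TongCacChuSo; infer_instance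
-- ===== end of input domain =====

-- B replaces A's modulo/floor-division while-loop by summing the digit characters of str(n) (idiomatic; same cost).

-- ===== PORT A =====
-- the while-loop: tmp += n%10; n //= 10 while n > 0
def TongCacChuSoLoop (n tmp : Int) : Int :=
  if _h : n > 0 then
    TongCacChuSoLoop (PySem.Int.floordiv n 10) (tmp + PySem.Int.mod n 10)
  else tmp
termination_by n.toNat
decreasing_by
  simp only [PySem.Int.floordiv, Int.fdiv_eq_ediv]
  omega

def TongCacChuSo (n : Int) : Int :=
  let tmp := TongCacChuSoLoop n 0
  if PySem.Int.mod tmp 10 = 9 then 1 else 0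

-- ===== PORT B =====
-- int(c) for a single decimal-digit character c (which is all str(n) of n>0 contains) is exactly c.toNat - 48
def TongCacChuSo_alt (n : Int) : Int :=
  if n ≤ 0 then 0
  else
    let s := (PySem.Int.toChars n).foldl (fun acc c => acc + ((c.toNat : Int) - 48)) 0
    if PySem.Int.mod s 10 = 9 then 1 else 0

-- ===== PRECONDITION & SPEC =====
def Spec_TongCacChuSo (n : Int) (out : Int) : Prop := out = TongCacChuSo_alt n
instance (n : Int) (out : Int) : Decidable (Spec_TongCacChuSo n out) := by unfold Spec_TongCacChuSo; infer_instance

-- ===== CLAIM (what is proved, stated in full; the proofs are below) =====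
def Claim_equal_TongCacChuSo : Prop := ∀ (n : Int), Dom_TongCacChuSo n → Spec_TongCacChuSo n (TongCacChuSo n)

-- ===== LEMMAS AND PROOFS =====

def pvCharVal (c : Char) : Int := (c.toNat : Int) - 48

theorem pvCharVal_digitChar (d : Nat) (hd : d < 10) : pvCharVal (Nat.digitChar d) = (d : Int) := by
  interval_cases d <;> decide

theorem pvFoldl_eq_mapSum (l : List Char) (a : Int) :
    l.foldl (fun acc c => acc + pvCharVal c) a = a + (l.map pvCharVal).sum := by
  induction l generalizing a with
  | nil => simp
  | cons c t ih => simp [List.foldl_cons, ih, add_assoc]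

theorem pvCore_sum : ∀ fuel n ds, n < fuel →
    ((Nat.toDigitsCore 10 fuel n ds).map pvCharVal).sum
      = ((Nat.digits 10 n).sum : Int) + (ds.map pvCharVal).sum := by
  intro fuel
  induction fuel with
  | zero => intro n ds h; omega
  | succ fuel ih =>
    intro n ds h
    rw [Nat.toDigitsCore]
    by_cases h0 : n / 10 = 0
    · simp only [h0, if_pos]
      rcases Nat.eq_zero_or_pos n with hn | hn
      · subst hn; simp [pvCharVal_digitChar 0 (by norm_num)]
      · have hlt : n < 10 := by omega
        rw [Nat.digits_def' (by norm_num : 1 < 10) hn]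
        simp [h0, Nat.mod_eq_of_lt hlt, pvCharVal_digitChar n hlt]
    · simp only [if_neg h0]
      have hn : 0 < n := by omega
      have hfuel : n / 10 < fuel := by omega
      rw [ih (n / 10) _ hfuel, Nat.digits_def' (by norm_num : 1 < 10) hn]
      have hm : n % 10 < 10 := Nat.mod_lt _ (by norm_num)
      simp [pvCharVal_digitChar _ hm]
      ring

theorem pvLoop_aux : ∀ k : Nat, ∀ n tmp : Int, 0 ≤ n → n.toNat ≤ k →
    TongCacChuSoLoop n tmp = tmp + ((Nat.digits 10 n.toNat).sum : Int) := by
  intro k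
  induction k with
  | zero =>
    intro n tmp h1 h2
    have hn : n = 0 := by omega
    subst hn
    rw [TongCacChuSoLoop]
    simp
  | succ k ih =>
    intro n tmp h1 h2
    rw [TongCacChuSoLoop]
    by_cases hpos : n > 0
    · simp only [hpos, dif_pos]
      have hfd : PySem.Int.floordiv n 10 = n / 10 := by
        simp [PySem.Int.floordiv, Int.fdiv_eq_ediv]
      have h0 : (0:Int) ≤ n / 10 := by positivity
      have htn : (n / 10).toNat = n.toNat / 10 := by omega
      have hle : (n / 10).toNat ≤ k := by omega
      rw [hfd, ih _ _ h0 hle, htn]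
      have hpos' : 0 < n.toNat := by omega
      rw [Nat.digits_def' (by norm_num : 1 < 10) hpos']
      have hmod : PySem.Int.mod n 10 = ((n.toNat % 10 : Nat) : Int) := by
        simp [PySem.Int.mod, Int.fmod_eq_emod]
        omega
      rw [hmod]
      simp [add_assoc]
    · simp only [hpos, dif_neg, not_false_iff]
      have hn : n = 0 := by omega
      subst hn
      simp

theorem TongCacChuSo_spec : Claim_equal_TongCacChuSo := by
  unfold Claim_equal_TongCacChuSo Spec_TongCacChuSo
  intro n _
  unfold TongCacChuSo TongCacChuSo_alt
  by_cases h : n ≤ 0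
  · have hloop : TongCacChuSoLoop n 0 = 0 := by
      rw [TongCacChuSoLoop]; simp [show ¬ n > 0 by omega]
    simp [hloop, h, PySem.Int.mod, Int.fmod_eq_emod]
  · have hn : 0 < n := by omega
    have hloop : TongCacChuSoLoop n 0 = ((Nat.digits 10 n.toNat).sum : Int) := by
      rw [pvLoop_aux n.toNat n 0 (by omega) le_rfl]; ring
    have hchars : PySem.Int.toChars n = Nat.toDigits 10 n.toNat := by
      simp [PySem.Int.toChars, show ¬ n < 0 by omega]
    have hsum : (PySem.Int.toChars n).foldl (fun acc c => acc + ((c.toNat : Int) - 48)) 0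
        = ((Nat.digits 10 n.toNat).sum : Int) := by
      have := pvFoldl_eq_mapSum (PySem.Int.toChars n) 0
      simp only [pvCharVal] at this
      rw [this, hchars, Nat.toDigits,
        pvCore_sum (n.toNat + 1) n.toNat [] (by omega)]
      simp
    simp [h, hloop, hsum]
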